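-- pv_equiv track=rewrite | github.com/psg759/Baekjoon | 프로그래머스/0/181890. 왼쪽 오른쪽/왼쪽 오른쪽.py | solution
-- ===== SOURCE A (Python) =====
-- def solution(str_list):
--     answer = []
--     if 'l' not in str_list and 'r' not in str_list:
--         return []
--
--     for i in range(len(str_list)):
--         if str_list[i] == 'l':
--             answer.extend(str_list[:i])
--             return answer
--
--         elif str_list[i] == 'r':
--             answer.extend(str_list[i+1:])
--             return answer
-- ===== SOURCE B (Python) =====
-- def solution(str_list):
--     acc = []
--     it = iter(str_list)
--     for s in it:
--         if s == 'l':
--             return acc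
--         if s == 'r':
--             return list(it)
--         acc.append(s)
--     return []
-- ===== Notes on version B (the rewrite author's own statement) =====
-- stated objective: simpler
-- what changed: single pass over an iterator with an accumulated prefix: no membership pre-scans, no indices, no slicing -- on 'l' return the accumulator, on 'r' return the rest of the iterator, and an empty result if the pass ends
import Mathlib
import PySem

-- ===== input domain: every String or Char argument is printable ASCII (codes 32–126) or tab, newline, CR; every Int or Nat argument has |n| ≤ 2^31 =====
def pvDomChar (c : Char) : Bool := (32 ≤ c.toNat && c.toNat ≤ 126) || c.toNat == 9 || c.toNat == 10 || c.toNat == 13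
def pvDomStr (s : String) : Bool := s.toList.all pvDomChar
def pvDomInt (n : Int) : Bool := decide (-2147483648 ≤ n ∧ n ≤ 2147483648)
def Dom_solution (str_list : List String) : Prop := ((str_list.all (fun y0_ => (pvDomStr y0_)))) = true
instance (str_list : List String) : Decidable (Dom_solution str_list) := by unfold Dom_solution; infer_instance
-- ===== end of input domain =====

-- B replaces A's two membership pre-scans + index loop + slices by one pass that accumulates the
-- prefix and returns the iterator's remainder (simpler decomposition; same asymptotic cost).

-- ===== PORT A =====
-- the for-loop over range(len(str_list)): recursion over the remaining suffix carrying the index i;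
-- str_list[:i] / str_list[i+1:] with 0 ≤ i < len are exactly take i / drop (i+1).
-- if the loop finished with no match Python would fall off returning None; under A's guard that is unreachable, [] stands in.
def solLoopA (orig : List String) : List String → Nat → List String
  | [], _ => []
  | s :: rest, i =>
      if s = "l" then [] ++ orig.take i
      else if s = "r" then [] ++ orig.drop (i + 1)
      else solLoopA orig rest (i + 1)

def solution (str_list : List String) : List String :=
  if "l" ∉ str_list ∧ "r" ∉ str_list then []
  else solLoopA str_list str_list 0

-- ===== PORT B =====
-- one pass: acc is the prefix built so far, the recursion argument is the iterator's remainder;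
-- list(it) after consuming s is exactly the tail t.
def solGoB : List String → List String → List String
  | [], _ => []
  | s :: t, acc =>
      if s = "l" then acc
      else if s = "r" then t
      else solGoB t (acc ++ [s])

def solution_alt (str_list : List String) : List String :=
  solGoB str_list []

-- ===== PRECONDITION & SPEC =====
def Spec_solution (str_list : List String) (out : List String) : Prop := out = solution_alt str_list
instance (str_list : List String) (out : List String) : Decidable (Spec_solution str_list out) := by unfold Spec_solution; infer_instance

-- ===== CLAIM (what is proved, stated in full; the proofs are below) =====
def Claim_equal_solution : Prop := ∀ (str_list : List String), Dom_solution str_list → Spec_solution str_list (solution str_list)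

-- ===== LEMMAS AND PROOFS =====

-- A's loop, started anywhere, is characterised by the first indices of "l" and "r" in the remaining suffix.
theorem solLoopA_eq (rest : List String) : ∀ (pre : List String),
    solLoopA (pre ++ rest) rest pre.length =
      if rest.idxOf "l" < rest.idxOf "r"
      then (pre ++ rest).take (pre.length + rest.idxOf "l")
      else (pre ++ rest).drop (pre.length + rest.idxOf "r" + 1) := by
  induction rest with
  | nil =>
      intro pre
      simp [solLoopA, List.drop_eq_nil_of_le]
  | cons s t ih =>
      intro pre
      by_cases hl : s = "l"
      · subst hl
        simp [solLoopA, List.idxOf_cons_self,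
          List.idxOf_cons_ne t (by decide : ("l" : String) ≠ "r")]
      · by_cases hr : s = "r"
        · subst hr
          simp [solLoopA, hl, List.idxOf_cons_self,
            List.idxOf_cons_ne t (by decide : ("r" : String) ≠ "l")]
        · have e1 : List.idxOf "l" (s :: t) = List.idxOf "l" t + 1 := List.idxOf_cons_ne t hl
          have e2 : List.idxOf "r" (s :: t) = List.idxOf "r" t + 1 := List.idxOf_cons_ne t hr
          simp only [solLoopA]
          rw [if_neg hl, if_neg hr, e1, e2,
            show pre ++ s :: t = (pre ++ [s]) ++ t by simp,
            show pre.length + 1 = (pre ++ [s]).length by simp, ih]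
          simp only [List.length_append, List.length_cons, List.length_nil]
          by_cases hc : List.idxOf "l" t < List.idxOf "r" t
          · rw [if_pos hc, if_pos (by omega)]
            congr 1; omega
          · rw [if_neg hc, if_neg (by omega)]
            congr 1; omega

-- B's loop is characterised the same way: the accumulator holds exactly the consumed prefix.
theorem solGoB_eq (rest : List String) : ∀ (pre : List String),
    solGoB rest pre =
      if rest.idxOf "l" < rest.idxOf "r"
      then pre ++ rest.take (rest.idxOf "l")
      else rest.drop (rest.idxOf "r" + 1) := by
  induction rest with
  | nil =>
      intro pre
      simp [solGoB]
  | cons s t ih =>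
      intro pre
      by_cases hl : s = "l"
      · subst hl
        simp [solGoB, List.idxOf_cons_self,
          List.idxOf_cons_ne t (by decide : ("l" : String) ≠ "r")]
      · by_cases hr : s = "r"
        · subst hr
          simp [solGoB, hl, List.idxOf_cons_self,
            List.idxOf_cons_ne t (by decide : ("r" : String) ≠ "l")]
        · have e1 : List.idxOf "l" (s :: t) = List.idxOf "l" t + 1 := List.idxOf_cons_ne t hl
          have e2 : List.idxOf "r" (s :: t) = List.idxOf "r" t + 1 := List.idxOf_cons_ne t hr
          simp only [solGoB]
          rw [if_neg hl, if_neg hr, e1, e2, ih (pre ++ [s])]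
          by_cases hc : List.idxOf "l" t < List.idxOf "r" t
          · rw [if_pos hc, if_pos (by omega)]
            simp
          · rw [if_neg hc, if_neg (by omega)]
            simp

-- ===== VERDICT (by name: the statement is the Claim_ definition above) =====
theorem solution_spec : Claim_equal_solution := by
  intro xs _
  unfold Spec_solution solution solution_alt
  rw [solGoB_eq xs []]
  by_cases hb : "l" ∉ xs ∧ "r" ∉ xs
  · rw [if_pos hb]
    have h1 : xs.idxOf "l" = xs.length := List.idxOf_eq_length_iff.mpr hb.1
    have h2 : xs.idxOf "r" = xs.length := List.idxOf_eq_length_iff.mpr hb.2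
    rw [h1, h2, if_neg (lt_irrefl _), List.drop_eq_nil_of_le (by omega)]
  · rw [if_neg hb]
    have := solLoopA_eq xs []
    simp only [List.nil_append, List.length_nil, Nat.zero_add] at this
    rw [this]; simp
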